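-- pv_equiv track=rewrite | github.com/rhymeswithroll-beep/Druckenmiller-Fat-Pitch-PUBLIC | tools/patent_intel.py | _classify_cpc
-- ===== SOURCE A (Python) =====
-- CPC_CATEGORIES = {
--     "G06N": "AI/ML", "G06F": "Computing",
--     "H01L": "Semiconductor", "H01M": "Battery/Energy Storage",
--     "H04": "Telecom/5G",
--     "A61K": "Pharma", "A61P": "Pharma", "A61B": "Medical Devices",
--     "C07": "Chemistry", "C12": "Biotech",
--     "F03": "Renewable Energy", "H02": "Power Systems",
--     "B60": "Automotive", "B25": "Robotics",
--     "G16H": "Health IT",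
-- }
--
-- def _classify_cpc(cpc_id):
--     """Map a CPC subgroup ID to a human-readable technology category."""
--     if not cpc_id:
--         return None
--     cpc_upper = cpc_id.upper().strip()
--     # Try longest prefix first for specificity
--     for prefix in sorted(CPC_CATEGORIES.keys(), key=len, reverse=True):
--         if cpc_upper.startswith(prefix):
--             return CPC_CATEGORIES[prefix]
--     return None
-- ===== SOURCE B (Python) =====
-- CPC_CATEGORIES = {
--     "G06N": "AI/ML", "G06F": "Computing",
--     "H01L": "Semiconductor", "H01M": "Battery/Energy Storage",
--     "H04": "Telecom/5G",
--     "A61K": "Pharma", "A61P": "Pharma", "A61B": "Medical Devices",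
--     "C07": "Chemistry", "C12": "Biotech",
--     "F03": "Renewable Energy", "H02": "Power Systems",
--     "B60": "Automotive", "B25": "Robotics",
--     "G16H": "Health IT",
-- }
--
--
-- def _classify_cpc(cpc_id):
--     """Map a CPC subgroup ID to a human-readable technology category."""
--     if not cpc_id:
--         return None
--     cpc_upper = cpc_id.upper().strip()
--     # Longest length first preserves longest-prefix priority.
--     for length in sorted({len(k) for k in CPC_CATEGORIES}, reverse=True):
--         hit = CPC_CATEGORIES.get(cpc_upper[:length])
--         if hit is not None:
--             return hit
--     return None
-- ===== Notes on version B (the rewrite author's own statement) =====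
-- stated objective: alternative
-- what changed: Instead of scanning all length-sorted dictionary keys with startswith, B loops over the distinct key lengths (longest first) and looks the prefix slice cpc_upper[:L] up directly in the dict.
import Mathlib
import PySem

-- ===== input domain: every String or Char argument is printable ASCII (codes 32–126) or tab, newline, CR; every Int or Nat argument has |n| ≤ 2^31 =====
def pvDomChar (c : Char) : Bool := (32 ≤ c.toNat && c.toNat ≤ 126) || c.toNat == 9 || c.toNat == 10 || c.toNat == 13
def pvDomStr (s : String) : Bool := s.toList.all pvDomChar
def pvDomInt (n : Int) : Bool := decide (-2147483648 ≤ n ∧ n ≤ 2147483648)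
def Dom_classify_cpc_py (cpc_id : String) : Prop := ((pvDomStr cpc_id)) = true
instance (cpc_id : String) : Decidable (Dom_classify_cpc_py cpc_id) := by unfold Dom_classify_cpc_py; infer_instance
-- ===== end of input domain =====

-- B replaces A's startswith scan over all dictionary keys by direct dict lookups of the
-- prefix slices cpc_upper[:L], one per distinct key length L (longest first); objective: alternative.

-- the shared module constant CPC_CATEGORIES
def pvCPC : PySem.Dict String String := PySem.Dict.ofList
  [("G06N","AI/ML"), ("G06F","Computing"), ("H01L","Semiconductor"), ("H01M","Battery/Energy Storage"), ("H04","Telecom/5G"), ("A61K","Pharma"), ("A61P","Pharma"), ("A61B","Medical Devices"), ("C07","Chemistry"), ("C12","Biotech"), ("F03","Renewable Energy"), ("H02","Power Systems"), ("B60","Automotive"), ("B25","Robotics"), ("G16H","Health IT")]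

-- ===== PORT A =====
-- 'for prefix in sorted(keys, key=len, reverse=True): if cpc_upper.startswith(prefix): return CPC_CATEGORIES[prefix]'
-- (the dict access on a hit key always succeeds; it is ported as Dict.get?, which is some there)
def pvScan (u : String) : List String → Option String
  | [] => none
  | p :: ps => if PySem.Str.startswith u p then pvCPC.get? p else pvScan u ps

def classify_cpc_py (cpc_id : String) : Option String :=
  if cpc_id = "" then none
  else pvScan (PySem.Str.strip (PySem.Str.upper cpc_id))
        (PySem.List.sorted pvCPC.keys (fun k => PySem.Str.len k) true)

-- ===== PORT B =====
-- 'for length in sorted({len(k) for k in CPC_CATEGORIES}, reverse=True): hit = CPC_CATEGORIES.get(cpc_upper[:length]); if hit is not None: return hit'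
def pvLookupByLen (u : String) : List Int → Option String
  | [] => none
  | L :: ls =>
    match pvCPC.get? (PySem.Str.slice u none (some L)) with
    | some v => some v
    | none => pvLookupByLen u ls

def classify_cpc_py_alt (cpc_id : String) : Option String :=
  if cpc_id = "" then none
  else pvLookupByLen (PySem.Str.strip (PySem.Str.upper cpc_id))
        (PySem.List.sorted (PySem.Set.ofList (pvCPC.keys.map PySem.Str.len)) (fun x => x) true)

-- ===== PRECONDITION & SPEC =====
def Spec_classify_cpc_py (cpc_id : String) (out : Option String) : Prop := out = classify_cpc_py_alt cpc_id
instance (cpc_id : String) (out : Option String) : Decidable (Spec_classify_cpc_py cpc_id out) := by unfold Spec_classify_cpc_py; infer_instance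

-- ===== CLAIM (what is proved, stated in full; the proofs are below) =====
def Claim_equal_classify_cpc_py : Prop := ∀ (cpc_id : String), Dom_classify_cpc_py cpc_id → Spec_classify_cpc_py cpc_id (classify_cpc_py cpc_id)

-- ===== LEMMAS AND PROOFS =====

theorem pv_items : pvCPC.items = [("G06N","AI/ML"), ("G06F","Computing"), ("H01L","Semiconductor"), ("H01M","Battery/Energy Storage"), ("H04","Telecom/5G"), ("A61K","Pharma"), ("A61P","Pharma"), ("A61B","Medical Devices"), ("C07","Chemistry"), ("C12","Biotech"), ("F03","Renewable Energy"), ("H02","Power Systems"), ("B60","Automotive"), ("B25","Robotics"), ("G16H","Health IT")] := by decide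

theorem pv_sorted_keys : PySem.List.sorted pvCPC.keys (fun k => PySem.Str.len k) true =
    ["G06N", "G06F", "H01L", "H01M", "A61K", "A61P", "A61B", "G16H", "H04", "C07", "C12", "F03", "H02", "B60", "B25"] := by decide

theorem pv_sorted_lens : PySem.List.sorted (PySem.Set.ofList (pvCPC.keys.map PySem.Str.len)) (fun x => x) true = [4, 3] := by decide

theorem pv_sw_lit (v p : String) (n : Nat) (cs : List Char) (h1 : p.toList = cs) (h2 : cs.length = n) :
    PySem.Str.startswith v p = decide (v.toList.take n = cs) := by
  subst h1; subst h2
  rw [Bool.eq_iff_iff]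
  simp only [PySem.Str.startswith_eq, PySem.Chars.startswith_iff, decide_eq_true_eq,
    List.prefix_iff_eq_take]
  exact eq_comm

theorem pv_take3_ne4 (t : List Char) (cs : List Char) (h : cs.length = 4) :
    (List.take 3 t = cs) = False := by
  refine eq_false (fun hh => ?_)
  have := congrArg List.length hh
  rw [List.length_take] at this
  omega

theorem pv_get?_eval (k : String) : pvCPC.get? k =
    (if k.toList = ['G','0','6','N'] then some "AI/ML"
     else if k.toList = ['G','0','6','F'] then some "Computing"
     else if k.toList = ['H','0','1','L'] then some "Semiconductor"
     else if k.toList = ['H','0','1','M'] then some "Battery/Energy Storage"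
     else if k.toList = ['H','0','4'] then some "Telecom/5G"
     else if k.toList = ['A','6','1','K'] then some "Pharma"
     else if k.toList = ['A','6','1','P'] then some "Pharma"
     else if k.toList = ['A','6','1','B'] then some "Medical Devices"
     else if k.toList = ['C','0','7'] then some "Chemistry"
     else if k.toList = ['C','1','2'] then some "Biotech"
     else if k.toList = ['F','0','3'] then some "Renewable Energy"
     else if k.toList = ['H','0','2'] then some "Power Systems"
     else if k.toList = ['B','6','0'] then some "Automotive"
     else if k.toList = ['B','2','5'] then some "Robotics"
     else if k.toList = ['G','1','6','H'] then some "Health IT"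
     else none) := by
  by_cases h1 : k = "G06N"
  · subst h1; decide
  by_cases h2 : k = "G06F"
  · subst h2; decide
  by_cases h3 : k = "H01L"
  · subst h3; decide
  by_cases h4 : k = "H01M"
  · subst h4; decide
  by_cases h5 : k = "H04"
  · subst h5; decide
  by_cases h6 : k = "A61K"
  · subst h6; decide
  by_cases h7 : k = "A61P"
  · subst h7; decide
  by_cases h8 : k = "A61B"
  · subst h8; decide
  by_cases h9 : k = "C07"
  · subst h9; decide
  by_cases h10 : k = "C12"
  · subst h10; decide
  by_cases h11 : k = "F03"
  · subst h11; decide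
  by_cases h12 : k = "H02"
  · subst h12; decide
  by_cases h13 : k = "B60"
  · subst h13; decide
  by_cases h14 : k = "B25"
  · subst h14; decide
  by_cases h15 : k = "G16H"
  · subst h15; decide
  have b1 : ("G06N" == k) = false := by simp [Ne.symm h1]
  have b2 : ("G06F" == k) = false := by simp [Ne.symm h2]
  have b3 : ("H01L" == k) = false := by simp [Ne.symm h3]
  have b4 : ("H01M" == k) = false := by simp [Ne.symm h4]
  have b5 : ("H04" == k) = false := by simp [Ne.symm h5]
  have b6 : ("A61K" == k) = false := by simp [Ne.symm h6]
  have b7 : ("A61P" == k) = false := by simp [Ne.symm h7]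
  have b8 : ("A61B" == k) = false := by simp [Ne.symm h8]
  have b9 : ("C07" == k) = false := by simp [Ne.symm h9]
  have b10 : ("C12" == k) = false := by simp [Ne.symm h10]
  have b11 : ("F03" == k) = false := by simp [Ne.symm h11]
  have b12 : ("H02" == k) = false := by simp [Ne.symm h12]
  have b13 : ("B60" == k) = false := by simp [Ne.symm h13]
  have b14 : ("B25" == k) = false := by simp [Ne.symm h14]
  have b15 : ("G16H" == k) = false := by simp [Ne.symm h15]
  have l1 : ¬ (k.toList = ['G','0','6','N']) := fun h => h1 (String.toList_inj.mp h)
  have l2 : ¬ (k.toList = ['G','0','6','F']) := fun h => h2 (String.toList_inj.mp h)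
  have l3 : ¬ (k.toList = ['H','0','1','L']) := fun h => h3 (String.toList_inj.mp h)
  have l4 : ¬ (k.toList = ['H','0','1','M']) := fun h => h4 (String.toList_inj.mp h)
  have l5 : ¬ (k.toList = ['H','0','4']) := fun h => h5 (String.toList_inj.mp h)
  have l6 : ¬ (k.toList = ['A','6','1','K']) := fun h => h6 (String.toList_inj.mp h)
  have l7 : ¬ (k.toList = ['A','6','1','P']) := fun h => h7 (String.toList_inj.mp h)
  have l8 : ¬ (k.toList = ['A','6','1','B']) := fun h => h8 (String.toList_inj.mp h)
  have l9 : ¬ (k.toList = ['C','0','7']) := fun h => h9 (String.toList_inj.mp h)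
  have l10 : ¬ (k.toList = ['C','1','2']) := fun h => h10 (String.toList_inj.mp h)
  have l11 : ¬ (k.toList = ['F','0','3']) := fun h => h11 (String.toList_inj.mp h)
  have l12 : ¬ (k.toList = ['H','0','2']) := fun h => h12 (String.toList_inj.mp h)
  have l13 : ¬ (k.toList = ['B','6','0']) := fun h => h13 (String.toList_inj.mp h)
  have l14 : ¬ (k.toList = ['B','2','5']) := fun h => h14 (String.toList_inj.mp h)
  have l15 : ¬ (k.toList = ['G','1','6','H']) := fun h => h15 (String.toList_inj.mp h)
  simp [PySem.Dict.get?, pv_items, List.find?, b1, b2, b3, b4, b5, b6, b7, b8, b9, b10, b11, b12, b13, b14, b15, l1, l2, l3, l4, l5, l6, l7, l8, l9, l10, l11, l12, l13, l14, l15]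

theorem pv_slice4 (v : String) :
    (PySem.Str.slice v none (some 4)).toList = List.take 4 v.toList := by
  rw [PySem.Str.toList_slice]
  show PySem.List.slice v.toList none (some ((4 : Nat) : Int)) = _
  rw [PySem.List.slice_to_natCast]

theorem pv_slice3 (v : String) :
    (PySem.Str.slice v none (some 3)).toList = List.take 3 v.toList := by
  rw [PySem.Str.toList_slice]
  show PySem.List.slice v.toList none (some ((3 : Nat) : Int)) = _
  rw [PySem.List.slice_to_natCast]

theorem pv_main (v : String) :
    pvScan v ["G06N", "G06F", "H01L", "H01M", "A61K", "A61P", "A61B", "G16H", "H04", "C07", "C12", "F03", "H02", "B60", "B25"] = pvLookupByLen v [4, 3] := by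
  simp only [pvScan, pvLookupByLen]
  rw [pv_sw_lit v "G06N" 4 ['G','0','6','N'] rfl rfl, pv_sw_lit v "G06F" 4 ['G','0','6','F'] rfl rfl, pv_sw_lit v "H01L" 4 ['H','0','1','L'] rfl rfl, pv_sw_lit v "H01M" 4 ['H','0','1','M'] rfl rfl, pv_sw_lit v "A61K" 4 ['A','6','1','K'] rfl rfl, pv_sw_lit v "A61P" 4 ['A','6','1','P'] rfl rfl, pv_sw_lit v "A61B" 4 ['A','6','1','B'] rfl rfl, pv_sw_lit v "G16H" 4 ['G','1','6','H'] rfl rfl, pv_sw_lit v "H04" 3 ['H','0','4'] rfl rfl, pv_sw_lit v "C07" 3 ['C','0','7'] rfl rfl, pv_sw_lit v "C12" 3 ['C','1','2'] rfl rfl, pv_sw_lit v "F03" 3 ['F','0','3'] rfl rfl, pv_sw_lit v "H02" 3 ['H','0','2'] rfl rfl, pv_sw_lit v "B60" 3 ['B','6','0'] rfl rfl, pv_sw_lit v "B25" 3 ['B','2','5'] rfl rfl]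
  simp only [(show pvCPC.get? "G06N" = some "AI/ML" from by decide), (show pvCPC.get? "G06F" = some "Computing" from by decide), (show pvCPC.get? "H01L" = some "Semiconductor" from by decide), (show pvCPC.get? "H01M" = some "Battery/Energy Storage" from by decide), (show pvCPC.get? "A61K" = some "Pharma" from by decide), (show pvCPC.get? "A61P" = some "Pharma" from by decide), (show pvCPC.get? "A61B" = some "Medical Devices" from by decide), (show pvCPC.get? "G16H" = some "Health IT" from by decide), (show pvCPC.get? "H04" = some "Telecom/5G" from by decide), (show pvCPC.get? "C07" = some "Chemistry" from by decide), (show pvCPC.get? "C12" = some "Biotech" from by decide), (show pvCPC.get? "F03" = some "Renewable Energy" from by decide), (show pvCPC.get? "H02" = some "Power Systems" from by decide), (show pvCPC.get? "B60" = some "Automotive" from by decide), (show pvCPC.get? "B25" = some "Robotics" from by decide)]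
  rw [pv_get?_eval (PySem.Str.slice v none (some 4)), pv_get?_eval (PySem.Str.slice v none (some 3))]
  simp only [pv_slice4, pv_slice3, decide_eq_true_eq]
  have h33 : List.take 3 v.toList = List.take 3 (List.take 4 v.toList) := by simp [List.take_take]
  rw [h33]
  generalize List.take 4 v.toList = t
  by_cases q1 : t = ['G','0','6','N']
  · simp [q1]
  by_cases q2 : t = ['G','0','6','F']
  · simp [q2]
  by_cases q3 : t = ['H','0','1','L']
  · simp [q3]
  by_cases q4 : t = ['H','0','1','M']
  · simp [q4]
  by_cases q5 : t = ['A','6','1','K']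
  · simp [q5]
  by_cases q6 : t = ['A','6','1','P']
  · simp [q6]
  by_cases q7 : t = ['A','6','1','B']
  · simp [q7]
  by_cases q8 : t = ['G','1','6','H']
  · simp [q8]
  by_cases r1 : List.take 3 t = ['H','0','4']
  · by_cases s1 : t = ['H','0','4']
    · simp [s1]
    have n1_2 : ¬ (t = ['C','0','7']) := fun he => by rw [he] at r1; exact absurd r1 (by decide)
    have n1_3 : ¬ (t = ['C','1','2']) := fun he => by rw [he] at r1; exact absurd r1 (by decide)
    have n1_4 : ¬ (t = ['F','0','3']) := fun he => by rw [he] at r1; exact absurd r1 (by decide)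
    have n1_5 : ¬ (t = ['H','0','2']) := fun he => by rw [he] at r1; exact absurd r1 (by decide)
    have n1_6 : ¬ (t = ['B','6','0']) := fun he => by rw [he] at r1; exact absurd r1 (by decide)
    have n1_7 : ¬ (t = ['B','2','5']) := fun he => by rw [he] at r1; exact absurd r1 (by decide)
    simp [r1, s1, q1, q2, q3, q4, q5, q6, q7, q8, n1_2, n1_3, n1_4, n1_5, n1_6, n1_7]
  by_cases r2 : List.take 3 t = ['C','0','7']
  · by_cases s2 : t = ['C','0','7']
    · simp [s2]
    have n2_1 : ¬ (t = ['H','0','4']) := fun he => by rw [he] at r2; exact absurd r2 (by decide)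
    have n2_3 : ¬ (t = ['C','1','2']) := fun he => by rw [he] at r2; exact absurd r2 (by decide)
    have n2_4 : ¬ (t = ['F','0','3']) := fun he => by rw [he] at r2; exact absurd r2 (by decide)
    have n2_5 : ¬ (t = ['H','0','2']) := fun he => by rw [he] at r2; exact absurd r2 (by decide)
    have n2_6 : ¬ (t = ['B','6','0']) := fun he => by rw [he] at r2; exact absurd r2 (by decide)
    have n2_7 : ¬ (t = ['B','2','5']) := fun he => by rw [he] at r2; exact absurd r2 (by decide)
    simp [r2, s2, q1, q2, q3, q4, q5, q6, q7, q8, n2_1, n2_3, n2_4, n2_5, n2_6, n2_7]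
  by_cases r3 : List.take 3 t = ['C','1','2']
  · by_cases s3 : t = ['C','1','2']
    · simp [s3]
    have n3_1 : ¬ (t = ['H','0','4']) := fun he => by rw [he] at r3; exact absurd r3 (by decide)
    have n3_2 : ¬ (t = ['C','0','7']) := fun he => by rw [he] at r3; exact absurd r3 (by decide)
    have n3_4 : ¬ (t = ['F','0','3']) := fun he => by rw [he] at r3; exact absurd r3 (by decide)
    have n3_5 : ¬ (t = ['H','0','2']) := fun he => by rw [he] at r3; exact absurd r3 (by decide)
    have n3_6 : ¬ (t = ['B','6','0']) := fun he => by rw [he] at r3; exact absurd r3 (by decide)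
    have n3_7 : ¬ (t = ['B','2','5']) := fun he => by rw [he] at r3; exact absurd r3 (by decide)
    simp [r3, s3, q1, q2, q3, q4, q5, q6, q7, q8, n3_1, n3_2, n3_4, n3_5, n3_6, n3_7]
  by_cases r4 : List.take 3 t = ['F','0','3']
  · by_cases s4 : t = ['F','0','3']
    · simp [s4]
    have n4_1 : ¬ (t = ['H','0','4']) := fun he => by rw [he] at r4; exact absurd r4 (by decide)
    have n4_2 : ¬ (t = ['C','0','7']) := fun he => by rw [he] at r4; exact absurd r4 (by decide)
    have n4_3 : ¬ (t = ['C','1','2']) := fun he => by rw [he] at r4; exact absurd r4 (by decide)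
    have n4_5 : ¬ (t = ['H','0','2']) := fun he => by rw [he] at r4; exact absurd r4 (by decide)
    have n4_6 : ¬ (t = ['B','6','0']) := fun he => by rw [he] at r4; exact absurd r4 (by decide)
    have n4_7 : ¬ (t = ['B','2','5']) := fun he => by rw [he] at r4; exact absurd r4 (by decide)
    simp [r4, s4, q1, q2, q3, q4, q5, q6, q7, q8, n4_1, n4_2, n4_3, n4_5, n4_6, n4_7]
  by_cases r5 : List.take 3 t = ['H','0','2']
  · by_cases s5 : t = ['H','0','2']
    · simp [s5]
    have n5_1 : ¬ (t = ['H','0','4']) := fun he => by rw [he] at r5; exact absurd r5 (by decide)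
    have n5_2 : ¬ (t = ['C','0','7']) := fun he => by rw [he] at r5; exact absurd r5 (by decide)
    have n5_3 : ¬ (t = ['C','1','2']) := fun he => by rw [he] at r5; exact absurd r5 (by decide)
    have n5_4 : ¬ (t = ['F','0','3']) := fun he => by rw [he] at r5; exact absurd r5 (by decide)
    have n5_6 : ¬ (t = ['B','6','0']) := fun he => by rw [he] at r5; exact absurd r5 (by decide)
    have n5_7 : ¬ (t = ['B','2','5']) := fun he => by rw [he] at r5; exact absurd r5 (by decide)
    simp [r5, s5, q1, q2, q3, q4, q5, q6, q7, q8, n5_1, n5_2, n5_3, n5_4, n5_6, n5_7]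
  by_cases r6 : List.take 3 t = ['B','6','0']
  · by_cases s6 : t = ['B','6','0']
    · simp [s6]
    have n6_1 : ¬ (t = ['H','0','4']) := fun he => by rw [he] at r6; exact absurd r6 (by decide)
    have n6_2 : ¬ (t = ['C','0','7']) := fun he => by rw [he] at r6; exact absurd r6 (by decide)
    have n6_3 : ¬ (t = ['C','1','2']) := fun he => by rw [he] at r6; exact absurd r6 (by decide)
    have n6_4 : ¬ (t = ['F','0','3']) := fun he => by rw [he] at r6; exact absurd r6 (by decide)
    have n6_5 : ¬ (t = ['H','0','2']) := fun he => by rw [he] at r6; exact absurd r6 (by decide)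
    have n6_7 : ¬ (t = ['B','2','5']) := fun he => by rw [he] at r6; exact absurd r6 (by decide)
    simp [r6, s6, q1, q2, q3, q4, q5, q6, q7, q8, n6_1, n6_2, n6_3, n6_4, n6_5, n6_7]
  by_cases r7 : List.take 3 t = ['B','2','5']
  · by_cases s7 : t = ['B','2','5']
    · simp [s7]
    have n7_1 : ¬ (t = ['H','0','4']) := fun he => by rw [he] at r7; exact absurd r7 (by decide)
    have n7_2 : ¬ (t = ['C','0','7']) := fun he => by rw [he] at r7; exact absurd r7 (by decide)
    have n7_3 : ¬ (t = ['C','1','2']) := fun he => by rw [he] at r7; exact absurd r7 (by decide)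
    have n7_4 : ¬ (t = ['F','0','3']) := fun he => by rw [he] at r7; exact absurd r7 (by decide)
    have n7_5 : ¬ (t = ['H','0','2']) := fun he => by rw [he] at r7; exact absurd r7 (by decide)
    have n7_6 : ¬ (t = ['B','6','0']) := fun he => by rw [he] at r7; exact absurd r7 (by decide)
    simp [r7, s7, q1, q2, q3, q4, q5, q6, q7, q8, n7_1, n7_2, n7_3, n7_4, n7_5, n7_6]
  have m1 : ¬ (t = ['H','0','4']) := fun he => by rw [he] at r1; exact absurd rfl r1
  have m2 : ¬ (t = ['C','0','7']) := fun he => by rw [he] at r2; exact absurd rfl r2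
  have m3 : ¬ (t = ['C','1','2']) := fun he => by rw [he] at r3; exact absurd rfl r3
  have m4 : ¬ (t = ['F','0','3']) := fun he => by rw [he] at r4; exact absurd rfl r4
  have m5 : ¬ (t = ['H','0','2']) := fun he => by rw [he] at r5; exact absurd rfl r5
  have m6 : ¬ (t = ['B','6','0']) := fun he => by rw [he] at r6; exact absurd rfl r6
  have m7 : ¬ (t = ['B','2','5']) := fun he => by rw [he] at r7; exact absurd rfl r7
  simp [q1, q2, q3, q4, q5, q6, q7, q8, r1, r2, r3, r4, r5, r6, r7, m1, m2, m3, m4, m5, m6, m7, pv_take3_ne4 t ['G','0','6','N'] rfl, pv_take3_ne4 t ['G','0','6','F'] rfl, pv_take3_ne4 t ['H','0','1','L'] rfl, pv_take3_ne4 t ['H','0','1','M'] rfl, pv_take3_ne4 t ['A','6','1','K'] rfl, pv_take3_ne4 t ['A','6','1','P'] rfl, pv_take3_ne4 t ['A','6','1','B'] rfl, pv_take3_ne4 t ['G','1','6','H'] rfl]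

-- ===== VERDICT (by name: the statement is the Claim_ definition above) =====
theorem classify_cpc_py_spec : Claim_equal_classify_cpc_py := by
  intro cpc_id _
  unfold Spec_classify_cpc_py classify_cpc_py classify_cpc_py_alt
  by_cases h : cpc_id = ""
  · simp [h]
  · rw [if_neg h, if_neg h, pv_sorted_keys, pv_sorted_lens, pv_main]
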